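-- pv_equiv track=rewrite | github.com/hmx222/JScanner2 | AI/Get_API.py | split_code_into_slices
-- ===== SOURCE A (Python) =====
-- CODE_SLICE_LINES = 15
--
-- def split_code_into_slices(code_str, lines_per_slice=CODE_SLICE_LINES):
--     valid_lines = [line.rstrip() for line in code_str.splitlines() if line.strip()]
--     total_lines = len(valid_lines)
--     slices = []
--     for start_idx in range(0, total_lines, lines_per_slice):
--         end_idx = min(start_idx + lines_per_slice - 1, total_lines - 1)
--         slice_lines = valid_lines[start_idx:end_idx + 1]
--         formatted_slice = [f"{start_idx + 1 + idx}: {line}" for idx, line in enumerate(slice_lines)]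
--         slices.append("\n".join(formatted_slice))
--     return slices
-- ===== SOURCE B (Python) =====
-- CODE_SLICE_LINES = 15
--
-- def split_code_into_slices(code_str, lines_per_slice=CODE_SLICE_LINES):
--     # Single streaming pass: filter, number, and chunk in one loop with an
--     # accumulator buffer that is flushed whenever it reaches lines_per_slice.
--     if lines_per_slice <= 0:
--         return []
--     slices = []
--     buf = []
--     n = 0
--     for raw in code_str.splitlines():
--         if raw.strip():
--             n += 1
--             buf.append(f"{n}: {raw.rstrip()}")
--             if len(buf) == lines_per_slice:
--                 slices.append("\n".join(buf))
--                 buf = []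
--     if buf:
--         slices.append("\n".join(buf))
--     return slices
-- ===== Notes on version B (the rewrite author's own statement) =====
-- stated objective: alternative
-- what changed: B replaces A's range/min/end_idx slice arithmetic and per-slice numbering with a single streaming loop over the raw lines that filters, numbers and buffers in one pass, flushing the buffer whenever it reaches lines_per_slice.
import Mathlib
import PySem

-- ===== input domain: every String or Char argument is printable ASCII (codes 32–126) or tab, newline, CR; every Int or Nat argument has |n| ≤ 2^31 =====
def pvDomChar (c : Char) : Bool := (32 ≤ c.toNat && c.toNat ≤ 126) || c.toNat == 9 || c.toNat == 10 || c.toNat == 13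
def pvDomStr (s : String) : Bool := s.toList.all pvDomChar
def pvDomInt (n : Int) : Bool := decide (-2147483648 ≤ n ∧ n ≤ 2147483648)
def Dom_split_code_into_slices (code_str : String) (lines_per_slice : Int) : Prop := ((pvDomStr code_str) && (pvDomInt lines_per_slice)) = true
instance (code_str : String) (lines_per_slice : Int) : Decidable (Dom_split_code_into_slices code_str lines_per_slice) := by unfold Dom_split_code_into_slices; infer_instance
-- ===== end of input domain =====

-- B replaces A's slice-by-slice index arithmetic (range/min/end_idx/offset) with a
-- single streaming pass: one loop over the raw lines that filters, numbers and
-- buffers lines, flushing the buffer whenever it fills (objective: simpler; same cost).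

-- ===== PORT A =====
def split_code_into_slices (code_str : String) (lines_per_slice : Int) : List String :=
  let valid_lines := ((PySem.Str.splitlines code_str).filter
      (fun ln => PySem.Str.strip ln != "")).map PySem.Str.rstrip
  let total_lines : Int := valid_lines.length
  (PySem.List.pyRange 0 total_lines lines_per_slice).foldl (fun slices start_idx =>
    let end_idx := min (start_idx + lines_per_slice - 1) (total_lines - 1)
    let slice_lines := PySem.List.slice valid_lines (some start_idx) (some (end_idx + 1))
    let formatted_slice := (PySem.List.enumerate slice_lines 0).map
      (fun p => PySem.Int.toStr (start_idx + 1 + p.1) ++ ": " ++ p.2)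
    slices ++ [PySem.Str.join "\n" formatted_slice]) []

-- ===== PORT B =====
def split_code_into_slices_alt (code_str : String) (lines_per_slice : Int) : List String :=
  if lines_per_slice ≤ 0 then []
  else
    let st := (PySem.Str.splitlines code_str).foldl
      (fun (st : List String × List String × Int) raw =>
        if PySem.Str.strip raw != "" then
          let n := st.2.2 + 1
          let buf := st.2.1 ++ [PySem.Int.toStr n ++ ": " ++ PySem.Str.rstrip raw]
          if (buf.length : Int) == lines_per_slice then
            (st.1 ++ [PySem.Str.join "\n" buf], [], n)
          else (st.1, buf, n)
        else st) ([], [], 0)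
    if st.2.1 ≠ [] then st.1 ++ [PySem.Str.join "\n" st.2.1] else st.1

-- ===== PRECONDITION & SPEC =====
-- A raises ValueError (range() arg 3 must not be zero) when lines_per_slice = 0.
def Pre_split_code_into_slices (code_str : String) (lines_per_slice : Int) : Prop :=
  lines_per_slice ≠ 0
instance (code_str : String) (lines_per_slice : Int) : Decidable (Pre_split_code_into_slices code_str lines_per_slice) := by unfold Pre_split_code_into_slices; infer_instance

def pvWitness_split_code_into_slices : String × Int := ("a\nb\n\nc", 2)

def Spec_split_code_into_slices (code_str : String) (lines_per_slice : Int) (out : List String) : Prop := out = split_code_into_slices_alt code_str lines_per_slice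
instance (code_str : String) (lines_per_slice : Int) (out : List String) : Decidable (Spec_split_code_into_slices code_str lines_per_slice out) := by unfold Spec_split_code_into_slices; infer_instance

-- ===== CLAIM (what is proved, stated in full; the proofs are below) =====
def Claim_equal_split_code_into_slices : Prop := ∀ (code_str : String) (lines_per_slice : Int), Dom_split_code_into_slices code_str lines_per_slice → Pre_split_code_into_slices code_str lines_per_slice → Spec_split_code_into_slices code_str lines_per_slice (split_code_into_slices code_str lines_per_slice)

-- ===== LEMMAS AND PROOFS =====

-- proof-side helpers: the cleaned lines, the globally numbered lines, B's loop
-- body split into its counter-free chunking core, and the recursive chunk shape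
-- both programs are reduced to
def pvLinesOf (code_str : String) : List String :=
  ((PySem.Str.splitlines code_str).filter
      (fun ln => PySem.Str.strip ln != "")).map PySem.Str.rstrip

def pvNumbered (code_str : String) : List String :=
  (PySem.List.enumerate (pvLinesOf code_str) 1).map
    (fun p => PySem.Int.toStr p.1 ++ ": " ++ p.2)

def pvStep (k : Int) (st : List String × List String) (s : String) : List String × List String :=
  let buf := st.2 ++ [s]
  if (buf.length : Int) == k then (st.1 ++ [PySem.Str.join "\n" buf], []) else (st.1, buf)

def pvCStep (k : Int) (st : List String × List String × Int) (l : String) :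
    List String × List String × Int :=
  let n := st.2.2 + 1
  let buf := st.2.1 ++ [PySem.Int.toStr n ++ ": " ++ l]
  if (buf.length : Int) == k then (st.1 ++ [PySem.Str.join "\n" buf], [], n)
  else (st.1, buf, n)

def pvChunks (kt : Nat) : List String → List String
  | [] => []
  | x :: xs =>
      PySem.Str.join "\n" ((x :: xs).take (kt + 1)) :: pvChunks kt ((x :: xs).drop (kt + 1))
termination_by l => l.length
decreasing_by simp

theorem pv_pyRange_neg (n k : Int) (h : 0 ≤ n) (hk : k < 0) :
    PySem.List.pyRange 0 n k = [] := by
  unfold PySem.List.pyRange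
  split_ifs <;> first | rfl | omega

theorem pv_pyRange_nonpos (n k : Int) (h : n ≤ 0) (hk : 0 < k) :
    PySem.List.pyRange 0 n k = [] := by
  rw [PySem.List.pyRange_of_pos _ _ hk, if_neg (by omega)]
  rfl

theorem pv_enum_drop {α : Type} (xs : List α) (m : Nat) (s : Int) :
    (PySem.List.enumerate xs s).drop m = PySem.List.enumerate (xs.drop m) (s + m) := by
  induction xs generalizing m s with
  | nil => simp [PySem.List.enumerate_nil]
  | cons x xs ih =>
    cases m with
    | zero => simp
    | succ m =>
      rw [PySem.List.enumerate_cons]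
      simp only [List.drop_succ_cons]
      rw [ih m (s + 1)]
      congr 1
      push_cast
      ring

theorem pv_enum_take {α : Type} (xs : List α) (m : Nat) (s : Int) :
    (PySem.List.enumerate xs s).take m = PySem.List.enumerate (xs.take m) s := by
  induction xs generalizing m s with
  | nil => simp [PySem.List.enumerate_nil]
  | cons x xs ih =>
    cases m with
    | zero => simp [PySem.List.enumerate_nil]
    | succ m =>
      rw [PySem.List.enumerate_cons]
      simp only [List.take_succ_cons]
      rw [PySem.List.enumerate_cons, ih m (s + 1)]

theorem pv_enum_shift {α β : Type} (f : Int → α → β) (xs : List α) (c a : Int) :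
    (PySem.List.enumerate xs (c + a)).map (fun p => f p.1 p.2)
      = (PySem.List.enumerate xs a).map (fun p => f (c + p.1) p.2) := by
  induction xs generalizing a with
  | nil => simp [PySem.List.enumerate_nil]
  | cons x xs ih =>
    rw [PySem.List.enumerate_cons, PySem.List.enumerate_cons]
    simp only [List.map_cons]
    rw [show c + a + 1 = c + (a + 1) by ring, ih (a + 1)]

-- the body A computes for one start index equals the corresponding slice of the
-- globally numbered list
theorem pv_body_eq (L : List String) (k s : Int) (hk : 0 < k) (hs : 0 ≤ s)
    (hsn : s < (L.length : Int)) :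
    PySem.Str.join "\n" ((PySem.List.enumerate
        (PySem.List.slice L (some s) (some (min (s + k - 1) ((L.length : Int) - 1) + 1))) 0).map
      (fun p => PySem.Int.toStr (s + 1 + p.1) ++ ": " ++ p.2))
    = PySem.Str.join "\n" (PySem.List.slice
        ((PySem.List.enumerate L 1).map (fun p => PySem.Int.toStr p.1 ++ ": " ++ p.2))
        (some s) (some (s + k))) := by
  obtain ⟨m, rfl⟩ : ∃ m : Nat, s = (m : Int) := ⟨s.toNat, (Int.toNat_of_nonneg hs).symm⟩
  have hm : m < L.length := by exact_mod_cast hsn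
  have hA : PySem.List.slice L (some (m : Int))
      (some (min ((m : Int) + k - 1) ((L.length : Int) - 1) + 1))
      = (L.drop m).take k.toNat := by
    rw [PySem.List.slice_toNat L (by omega) (by omega)]
    simp only [Int.toNat_natCast]
    have hlen : (L.drop m).length = L.length - m := List.length_drop
    rcases Nat.lt_or_ge L.length (m + k.toNat) with hlt | hle
    swap
    · have : (min ((m : Int) + k - 1) ((L.length : Int) - 1) + 1).toNat - m = k.toNat := by
        omega
      rw [this]
    · have h1 : (min ((m : Int) + k - 1) ((L.length : Int) - 1) + 1).toNat - m
          = L.length - m := by omega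
      rw [h1, List.take_of_length_le (by omega), List.take_of_length_le (by omega)]
  rw [hA]
  have hB : PySem.List.slice
      ((PySem.List.enumerate L 1).map (fun p => PySem.Int.toStr p.1 ++ ": " ++ p.2))
      (some (m : Int)) (some ((m : Int) + k))
      = (PySem.List.enumerate ((L.drop m).take k.toNat) (1 + m)).map
          (fun p => PySem.Int.toStr p.1 ++ ": " ++ p.2) := by
    rw [PySem.List.slice_toNat _ (by omega) (by omega)]
    have : ((m : Int) + k).toNat - (m : Int).toNat = k.toNat := by omega
    rw [this, ← List.map_drop, ← List.map_take, pv_enum_drop, pv_enum_take]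
    simp
  rw [hB]
  congr 1
  rw [show (1 : Int) + m = (m + 1) + 0 by ring, pv_enum_shift
    (fun i l => PySem.Int.toStr i ++ ": " ++ l) ((L.drop m).take k.toNat) ((m : Int) + 1) 0]

-- A equals the pyRange-chunking of the globally numbered list
theorem pv_A_mid (code_str : String) (k : Int) (hk : k ≠ 0) :
    split_code_into_slices code_str k =
      (PySem.List.pyRange 0 (((pvNumbered code_str).length : Nat) : Int) k).map
        (fun s => PySem.Str.join "\n"
          (PySem.List.slice (pvNumbered code_str) (some s) (some (s + k)))) := by
  simp only [split_code_into_slices]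
  set L := ((PySem.Str.splitlines code_str).filter
      (fun ln => PySem.Str.strip ln != "")).map PySem.Str.rstrip with hL
  have hLL : pvLinesOf code_str = L := rfl
  have hlen : ((pvNumbered code_str).length : Int) = (L.length : Int) := by
    simp [pvNumbered, hLL, PySem.List.length_enumerate]
  rw [hlen]
  rcases lt_or_gt_of_ne hk with hneg | hpos
  · rw [pv_pyRange_neg _ _ (by positivity) hneg]
    rfl
  · rw [PySem.List.foldl_append_singleton_eq_map]
    simp only [List.nil_append]
    apply List.map_congr_left
    intro s hs
    rw [PySem.List.mem_pyRange_iff_of_pos hpos] at hs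
    exact pv_body_eq L k s hpos hs.1 hs.2.1

-- B's loop equals the counter-free chunking fold over the numbered lines
theorem pv_fuse (k : Int) (raws : List String) (st : List String × List String × Int) :
    raws.foldl
      (fun (st : List String × List String × Int) raw =>
        if PySem.Str.strip raw != "" then
          let n := st.2.2 + 1
          let buf := st.2.1 ++ [PySem.Int.toStr n ++ ": " ++ PySem.Str.rstrip raw]
          if (buf.length : Int) == k then
            (st.1 ++ [PySem.Str.join "\n" buf], [], n)
          else (st.1, buf, n)
        else st) st
    = ((raws.filter (fun ln => PySem.Str.strip ln != "")).map PySem.Str.rstrip).foldl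
        (pvCStep k) st := by
  induction raws generalizing st with
  | nil => rfl
  | cons x xs ih =>
    by_cases h : (PySem.Str.strip x != "") = true
    · simp only [List.foldl_cons, List.filter_cons, h, if_pos, List.map_cons]
      rw [ih]
      rfl
    · simp only [List.foldl_cons, List.filter_cons, h, if_neg, Bool.false_eq_true,
        not_false_eq_true]
      rw [ih]

theorem pv_counter (k : Int) (L : List String) (S buf : List String) (m : Int) :
    L.foldl (pvCStep k) (S, buf, m)
      = ((((PySem.List.enumerate L (m + 1)).map
            (fun p => PySem.Int.toStr p.1 ++ ": " ++ p.2)).foldl (pvStep k) (S, buf)).1,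
         (((PySem.List.enumerate L (m + 1)).map
            (fun p => PySem.Int.toStr p.1 ++ ": " ++ p.2)).foldl (pvStep k) (S, buf)).2,
         m + (L.length : Int)) := by
  induction L generalizing S buf m with
  | nil => simp [PySem.List.enumerate_nil]
  | cons x xs ih =>
    rw [PySem.List.enumerate_cons]
    simp only [List.map_cons, List.foldl_cons]
    have hstep : pvCStep k (S, buf, m) x
        = ((pvStep k (S, buf) (PySem.Int.toStr (m + 1) ++ ": " ++ x)).1,
           (pvStep k (S, buf) (PySem.Int.toStr (m + 1) ++ ": " ++ x)).2, m + 1) := by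
      unfold pvCStep pvStep
      by_cases h : (((buf ++ [PySem.Int.toStr (m + 1) ++ ": " ++ x]).length : Int) == k) = true
      · simp only [h, if_pos]
      · simp only [h, Bool.false_eq_true, not_false_eq_true, if_neg]
    rw [hstep, ih]
    have : m + 1 + (xs.length : Int) = m + ((xs.length : Nat) + 1 : Nat) := by push_cast; ring
    simp only [List.length_cons]
    rw [this]

theorem pv_fill_short (k : Int) (N : List String) :
    ∀ (S buf : List String), ((buf.length : Int) + (N.length : Int) < k) →
      N.foldl (pvStep k) (S, buf) = (S, buf ++ N) := by
  induction N with
  | nil => intro S buf _; simp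
  | cons x xs ih =>
    intro S buf h
    simp only [List.foldl_cons]
    have hcond : (((buf ++ [x]).length : Int) == k) = false := by
      simp only [List.length_append, List.length_cons, List.length_nil, beq_eq_false_iff_ne,
        ne_eq]
      intro hc
      simp at h
      omega
    have hstep : pvStep k (S, buf) x = (S, buf ++ [x]) := by
      unfold pvStep
      simp only [hcond, Bool.false_eq_true, if_false]
    rw [hstep, ih S (buf ++ [x]) (by simp at h ⊢; omega)]
    simp

theorem pv_fill_exact (k : Int) (N : List String) :
    ∀ (S buf : List String), N ≠ [] → ((buf.length : Int) + (N.length : Int) = k) →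
      N.foldl (pvStep k) (S, buf) = (S ++ [PySem.Str.join "\n" (buf ++ N)], []) := by
  induction N with
  | nil => intro S buf hne _; exact absurd rfl hne
  | cons x xs ih =>
    intro S buf _ h
    simp only [List.foldl_cons]
    rcases List.eq_nil_or_concat' xs with rfl | _
    · have hbk : (buf.length : Int) + 1 = k := by simpa using h
      simp only [pvStep, List.foldl_nil]
      rw [if_pos (by
        simp only [beq_iff_eq, List.length_append, List.length_cons, List.length_nil]
        push_cast
        omega)]
    · have hxs : xs ≠ [] := by
        rename_i hc
        obtain ⟨_, _, rfl⟩ := hc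
        simp
      have hcond : (((buf ++ [x]).length : Int) == k) = false := by
        simp only [beq_eq_false_iff_ne, ne_eq, List.length_append, List.length_cons,
          List.length_nil]
        intro hc
        simp at h
        have : 0 < xs.length := List.length_pos_iff.mpr hxs
        omega
      have hstep : pvStep k (S, buf) x = (S, buf ++ [x]) := by
        unfold pvStep
        simp only [hcond, Bool.false_eq_true, if_false]
      rw [hstep, ih S (buf ++ [x]) hxs (by simp at h ⊢; omega)]
      simp

def pvFin (p : List String × List String) : List String :=
  if p.2 ≠ [] then p.1 ++ [PySem.Str.join "\n" p.2] else p.1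

theorem pv_C1 (k : Int) (hk : 0 < k) :
    ∀ (N S : List String), pvFin (N.foldl (pvStep k) (S, [])) = S ++ pvChunks (k.toNat - 1) N := by
  intro N
  induction hn : N.length using Nat.strong_induction_on generalizing N with
  | _ n ih =>
    intro S
    match N, hn with
    | [], _ => simp [pvFin, pvChunks]
    | x :: xs, hn =>
      have hkt : k.toNat - 1 + 1 = k.toNat := by omega
      rw [pvChunks, hkt]
      rcases Nat.lt_or_ge (x :: xs).length k.toNat with hlt | hle
      · -- fewer than k lines left: the whole rest is one final flushed chunk
        rw [pv_fill_short k _ S [] (by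
          simp only [List.length_nil, List.length_cons] at hlt ⊢
          push_cast
          omega)]
        have h1 : (x :: xs).take k.toNat = x :: xs := List.take_of_length_le (by omega)
        have h2 : (x :: xs).drop k.toNat = [] := List.drop_of_length_le (by omega)
        rw [h1, h2, pvChunks]
        simp [pvFin]
      · -- at least k lines: the first k are flushed, recurse on the rest
        have hsplit : (x :: xs) = (x :: xs).take k.toNat ++ (x :: xs).drop k.toNat :=
          (List.take_append_drop _ _).symm
        conv_lhs => rw [hsplit]
        rw [List.foldl_append]
        rw [pv_fill_exact k _ S [] (by
            intro hc
            have := congrArg List.length hc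
            simp [List.length_take] at this
            omega)
          (by
            simp only [List.length_cons] at hle
            simp only [List.length_nil, List.length_take, List.length_cons]
            push_cast
            omega)]
        simp only [List.nil_append]
        rw [ih ((x :: xs).drop k.toNat).length (by subst hn; simp; omega) _ rfl]
        simp

theorem pv_pyRange_peel (n k : Int) (hk : 0 < k) (hn : 0 < n) :
    PySem.List.pyRange 0 n k = 0 :: (PySem.List.pyRange 0 (n - k) k).map (fun s => k + s) := by
  rw [PySem.List.pyRange_of_pos _ _ hk, PySem.List.pyRange_of_pos _ _ hk]
  rw [if_pos (by omega)]
  have hq0 : 0 ≤ (n - 0 + k - 1) / k := Int.ediv_nonneg (by omega) (by omega)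
  have hm : ((n - 0 + k - 1) / k).toNat = (if 0 < n - k then ((n - k - 0 + k - 1) / k).toNat else 0) + 1 := by
    by_cases hbig : 0 < n - k
    · rw [if_pos hbig]
      have : n - 0 + k - 1 = (n - k - 0 + k - 1) + 1 * k := by ring
      rw [this, Int.add_mul_ediv_right _ _ (by omega)]
      have := Int.ediv_nonneg (show (0:Int) ≤ n - k - 0 + k - 1 by omega) (show (0:Int) ≤ k by omega)
      omega
    · rw [if_neg hbig]
      have h1 : (1 : Int) ≤ (n - 0 + k - 1) / k := by
        rw [Int.le_ediv_iff_mul_le (by omega)]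
        omega
      have h2 : (n - 0 + k - 1) / k < 2 := by
        rw [Int.ediv_lt_iff_lt_mul (by omega)]
        omega
      omega
  rw [hm, List.range_succ_eq_map]
  simp only [List.map_cons, List.map_map]
  refine List.cons_eq_cons.mpr ⟨by simp, ?_⟩
  apply List.map_congr_left
  intro j _
  simp only [Function.comp]
  push_cast
  ring

theorem pv_slice_shift (N : List String) (k s : Int) (hk : 0 < k) (hs : 0 ≤ s) :
    PySem.List.slice N (some (k + s)) (some (k + s + k))
      = PySem.List.slice (N.drop k.toNat) (some s) (some (s + k)) := by
  rw [PySem.List.slice_toNat _ (by omega) (by omega),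
    PySem.List.slice_toNat _ (by omega) (by omega)]
  rw [List.drop_drop]
  have h1 : (k + s + k).toNat - (k + s).toNat = k.toNat := by omega
  have h2 : (s + k).toNat - s.toNat = k.toNat := by omega
  have h3 : (k + s).toNat = k.toNat + s.toNat := by omega
  rw [h1, h2, h3]

theorem pv_C2 (k : Int) (hk : 0 < k) :
    ∀ (N : List String),
      (PySem.List.pyRange 0 ((N.length : Nat) : Int) k).map
        (fun s => PySem.Str.join "\n" (PySem.List.slice N (some s) (some (s + k))))
      = pvChunks (k.toNat - 1) N := by
  intro N
  induction hn : N.length using Nat.strong_induction_on generalizing N with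
  | _ n ih =>
    match N, hn with
    | [], hn0 =>
      have h0 : n = 0 := by simpa using hn0.symm
      subst h0
      rw [pv_pyRange_nonpos _ _ (by simp) hk, pvChunks]
      rfl
    | x :: xs, hn =>
      subst hn
      have hkt : k.toNat - 1 + 1 = k.toNat := by omega
      rw [pv_pyRange_peel _ _ hk (by simp only [List.length_cons]; push_cast; omega),
        pvChunks, hkt]
      simp only [List.map_cons, List.map_map]
      refine List.cons_eq_cons.mpr ⟨?_, ?_⟩
      · congr 1
        rw [show (0 : Int) + k = k by ring, PySem.List.slice_toNat _ (by omega) (by omega)]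
        simp
      · have htail : (PySem.List.pyRange 0 (((x :: xs).length : Nat) - k) k)
            = PySem.List.pyRange 0 ((((x :: xs).drop k.toNat).length : Nat) : Int) k := by
          rcases Nat.lt_or_ge (x :: xs).length k.toNat with hlt | hle
          · rw [pv_pyRange_nonpos _ _ (by
                simp only [List.length_cons] at hlt ⊢
                push_cast
                omega) hk,
              pv_pyRange_nonpos _ _ (by
                simp only [List.length_cons] at hlt
                simp only [List.length_drop, List.length_cons]
                omega) hk]
          · congr 1
            simp only [List.length_cons] at hle
            simp only [List.length_drop, List.length_cons]
            omega
        rw [htail]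
        rw [← ih ((x :: xs).drop k.toNat).length
          (by simp only [List.length_drop, List.length_cons]; omega) _ rfl]
        apply List.map_congr_left
        intro s hs
        rw [PySem.List.mem_pyRange_iff_of_pos hk] at hs
        simp only [Function.comp]
        rw [pv_slice_shift _ _ _ hk hs.1]

-- B equals the recursive chunking of the globally numbered list
theorem pv_B_chunks (code_str : String) (k : Int) (hk : 0 < k) :
    split_code_into_slices_alt code_str k = pvChunks (k.toNat - 1) (pvNumbered code_str) := by
  unfold split_code_into_slices_alt
  rw [if_neg (by omega)]
  rw [pv_fuse k]
  have hL : ((PySem.Str.splitlines code_str).filter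
      (fun ln => PySem.Str.strip ln != "")).map PySem.Str.rstrip = pvLinesOf code_str := rfl
  rw [hL, pv_counter k (pvLinesOf code_str) [] [] 0]
  have hN : (PySem.List.enumerate (pvLinesOf code_str) (0 + 1)).map
      (fun p => PySem.Int.toStr p.1 ++ ": " ++ p.2) = pvNumbered code_str := by
    rw [show (0 : Int) + 1 = 1 by ring]; rfl
  rw [hN]
  have := pv_C1 k hk (pvNumbered code_str) []
  simpa [pvFin] using this

-- ===== VERDICT (by name: the statement is the Claim_ definition above) =====
theorem split_code_into_slices_spec : Claim_equal_split_code_into_slices := by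
  intro code_str k _ hk
  unfold Spec_split_code_into_slices
  rcases lt_or_gt_of_ne (hk : k ≠ 0) with hneg | hpos
  · rw [pv_A_mid code_str k hk, pv_pyRange_neg _ _ (by positivity) hneg]
    unfold split_code_into_slices_alt
    rw [if_pos (by omega)]
    rfl
  · rw [pv_A_mid code_str k hk, pv_B_chunks code_str k hpos, pv_C2 k hpos]
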